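-- pv_equiv track=rewrite | github.com/xhcarina/UChi-Trading-2025 | case1/Final_position.py | calculate_fair_price
-- ===== SOURCE A (Python) =====
-- def calculate_fair_price(orders: list) -> float:
--     """Calculate fair price using parentheses matching algorithm"""
--     if not orders:
--         return None
--
--     # Sort orders by price
--     sorted_orders = sorted(orders, key=lambda x: x[0])
--
--     # Create parentheses string
--     s = ""
--     for price, volume, side in sorted_orders:
--         if side == "bid":
--             s += "(" * int(volume)
--         else:  # ask
--             s += ")" * int(volume)
--
--     if not s:
--         return None
--
--     # Find optimal price point
--     min_diff = float('inf')
--     fair_price_idx = 0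
--
--     for i in range(len(s)):
--         O = s[:i].count("(")
--         C = s[i:].count(")")
--         diff = abs(O - C)
--
--         if diff < min_diff:
--             min_diff = diff
--             fair_price_idx = i
--
--     # Map index back to price
--     current_idx = 0
--     for price, volume, side in sorted_orders:
--         current_idx += int(volume)
--         if current_idx > fair_price_idx:
--             return price
--
--     return sorted_orders[-1][0]
-- ===== SOURCE B (Python) =====
-- def calculate_fair_price(orders: list) -> float:
--     """Calculate fair price: closed-form index instead of building the
--     parentheses string and scanning it quadratically.
--
--     In A's string, every position i has diff |O-C| = |i - T| where T is the
--     total ask volume (clamped at 0 per order), so the first argmin is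
--     min(T, L-1) with L the string length.  O(n log n) vs A's O(L^2)."""
--     if not orders:
--         return None
--
--     sorted_orders = sorted(orders, key=lambda x: x[0])
--
--     L = 0  # total characters A's string would have
--     T = 0  # total ')' characters (ask side)
--     for _, volume, side in sorted_orders:
--         v = max(int(volume), 0)
--         L += v
--         if side != "bid":
--             T += v
--
--     if L == 0:
--         return None
--
--     fair_price_idx = min(T, L - 1)
--
--     current_idx = 0
--     for price, volume, _ in sorted_orders:
--         current_idx += int(volume)
--         if current_idx > fair_price_idx:
--             return price
--
--     return sorted_orders[-1][0]
-- ===== Notes on version B (the rewrite author's own statement) =====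
-- stated objective: faster
-- what changed: B never builds the parentheses string or scans it quadratically: since the per-index imbalance is exactly |i - T| (T = total ask volume), the optimal index is the closed form min(T, L-1), computed from one summing pass over the sorted orders.
import Mathlib
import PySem

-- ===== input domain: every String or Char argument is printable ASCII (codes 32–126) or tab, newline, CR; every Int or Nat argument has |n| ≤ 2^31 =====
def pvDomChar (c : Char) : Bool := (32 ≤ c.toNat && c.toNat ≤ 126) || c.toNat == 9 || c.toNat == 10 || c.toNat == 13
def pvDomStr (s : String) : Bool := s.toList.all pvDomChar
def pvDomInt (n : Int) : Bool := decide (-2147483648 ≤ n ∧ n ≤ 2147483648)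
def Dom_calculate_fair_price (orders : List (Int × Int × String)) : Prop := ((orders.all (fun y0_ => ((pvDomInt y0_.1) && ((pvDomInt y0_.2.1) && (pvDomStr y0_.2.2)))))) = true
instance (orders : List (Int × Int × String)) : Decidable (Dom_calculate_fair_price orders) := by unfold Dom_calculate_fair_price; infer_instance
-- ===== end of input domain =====

-- B replaces A's O(L^2) scan of the parentheses string by the closed-form index min(T, L-1); equal on all inputs (A is total).

-- ===== PORT A =====
-- the string-building loop: s += "(" * int(volume)  /  s += ")" * int(volume)
-- (List.replicate v.toNat matches Python's "c" * v, which is empty for v ≤ 0)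
def pvBuildS (sorted : List (Int × Int × String)) : List Char :=
  sorted.foldl (fun s o =>
    if o.2.2 = "bid" then s ++ List.replicate o.2.1.toNat '('
    else s ++ List.replicate o.2.1.toNat ')') []

-- the scan loop: min_diff starts at float('inf') (modelled as none), fair_price_idx at 0
def pvScanA (s : List Char) : Option Int × Int :=
  (PySem.List.pyRange 0 (s.length) 1).foldl (fun st i =>
    let O : Int := (PySem.List.slice s none (some i)).count '('   -- s[:i].count("(") (1-char needle: substring count = element count)
    let C : Int := (PySem.List.slice s (some i) none).count ')'   -- s[i:].count(")")
    let diff : Int := |O - C|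
    match st.1 with
    | none => (some diff, i)
    | some m => if diff < m then (some diff, i) else st) (none, 0)

-- the final mapping loop with its early return
def pvMapA : List (Int × Int × String) → Int → Int → Option Int
  | [], _, _ => none
  | (p, v, _) :: rest, cur, idx =>
    let cur := cur + v
    if cur > idx then some p else pvMapA rest cur idx

def calculate_fair_price (orders : List (Int × Int × String)) : Option Int :=
  if orders = [] then none
  else
    let sorted := PySem.List.sorted orders (fun x => x.1) false
    let s := pvBuildS sorted
    if s = [] then none
    else
      let fair_price_idx := (pvScanA s).2
      match pvMapA sorted 0 fair_price_idx with
      | some p => some p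
      | none => (PySem.List.pyGet? sorted (-1)).map (·.1)   -- sorted_orders[-1][0]

-- ===== PORT B =====
-- one summing pass: L = total characters, T = total ')' characters
def pvSumB (sorted : List (Int × Int × String)) : Int × Int :=
  sorted.foldl (fun p o =>
    let v := max o.2.1 0
    (p.1 + v, if o.2.2 ≠ "bid" then p.2 + v else p.2)) (0, 0)

def pvMapB : List (Int × Int × String) → Int → Int → Option Int
  | [], _, _ => none
  | (p, v, _) :: rest, cur, idx =>
    let cur := cur + v
    if cur > idx then some p else pvMapB rest cur idx

def calculate_fair_price_alt (orders : List (Int × Int × String)) : Option Int :=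
  if orders = [] then none
  else
    let sorted := PySem.List.sorted orders (fun x => x.1) false
    let LT := pvSumB sorted
    if LT.1 = 0 then none
    else
      let fair_price_idx := min LT.2 (LT.1 - 1)
      match pvMapB sorted 0 fair_price_idx with
      | some p => some p
      | none => (PySem.List.pyGet? sorted (-1)).map (·.1)

-- ===== PRECONDITION & SPEC =====
def Spec_calculate_fair_price (orders : List (Int × Int × String)) (out : Option Int) : Prop := out = calculate_fair_price_alt orders
instance (orders : List (Int × Int × String)) (out : Option Int) : Decidable (Spec_calculate_fair_price orders out) := by unfold Spec_calculate_fair_price; infer_instance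

-- ===== CLAIM (what is proved, stated in full; the proofs are below) =====
def Claim_equal_calculate_fair_price : Prop := ∀ (orders : List (Int × Int × String)), Dom_calculate_fair_price orders → Spec_calculate_fair_price orders (calculate_fair_price orders)

-- ===== LEMMAS AND PROOFS =====

-- per-order block of characters A appends
def pvG (o : Int × Int × String) : List Char :=
  if o.2.2 = "bid" then List.replicate o.2.1.toNat '(' else List.replicate o.2.1.toNat ')'

-- the scan loop's step function with the imbalance already in closed form |i - T|
def pvStep (T : Int) (st : Option Int × Int) (i : Int) : Option Int × Int :=
  match st.1 with
  | none => (some |i - T|, i)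
  | some m => if |i - T| < m then (some |i - T|, i) else st

lemma pvBuildS_eq (l : List (Int × Int × String)) : pvBuildS l = l.flatMap pvG := by
  unfold pvBuildS
  calc l.foldl (fun s o =>
        if o.2.2 = "bid" then s ++ List.replicate o.2.1.toNat '('
        else s ++ List.replicate o.2.1.toNat ')') []
      = l.foldl (fun s o => s ++ pvG o) [] :=
        PySem.List.foldl_congr_mem _ _ _ _ (by intro acc x _; unfold pvG; split <;> rfl)
    _ = [] ++ l.flatMap pvG := PySem.List.foldl_append_eq_flatMap pvG l []
    _ = l.flatMap pvG := by simp

lemma pvBuildS_paren (l : List (Int × Int × String)) :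
    ∀ c ∈ pvBuildS l, c = '(' ∨ c = ')' := by
  intro c hc
  rw [pvBuildS_eq] at hc
  rw [List.mem_flatMap] at hc
  obtain ⟨o, _, h⟩ := hc
  unfold pvG at h
  split at h
  · exact Or.inl (List.eq_of_mem_replicate h)
  · exact Or.inr (List.eq_of_mem_replicate h)

lemma pvSumB_aux (l : List (Int × Int × String)) (p : Int × Int) :
    l.foldl (fun p o =>
      let v := max o.2.1 0
      (p.1 + v, if o.2.2 ≠ "bid" then p.2 + v else p.2)) p
    = (p.1 + ((l.flatMap pvG).length : Int), p.2 + ((l.flatMap pvG).count ')' : Int)) := by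
  induction l generalizing p with
  | nil => simp
  | cons o rest ih =>
    simp only [List.foldl_cons, ih, List.flatMap_cons, List.length_append, List.count_append]
    unfold pvG
    by_cases h : o.2.2 = "bid" <;>
      simp only [h, if_true, if_false, ne_eq, not_true_eq_false, not_false_eq_true,
        List.count_replicate, List.length_replicate] <;>
      refine Prod.ext ?_ ?_ <;> simp <;> omega

lemma pvSumB_spec (l : List (Int × Int × String)) :
    pvSumB l = (((pvBuildS l).length : Int), ((pvBuildS l).count ')' : Int)) := by
  unfold pvSumB
  rw [pvSumB_aux, pvBuildS_eq]
  simp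

lemma pvParenCount (t : List Char) (h : ∀ c ∈ t, c = '(' ∨ c = ')') :
    t.count '(' + t.count ')' = t.length := by
  induction t with
  | nil => rfl
  | cons c t ih =>
    have hc := h c (by simp)
    have ht := ih (fun x hx => h x (by simp [hx]))
    rcases hc with hc | hc <;> subst hc <;> simp <;> omega

lemma pvArgmin (T : Int) (hT : 0 ≤ T) :
    ∀ n : Nat, 1 ≤ n →
      (PySem.List.pyRange 0 (n : Int) 1).foldl (pvStep T) (none, 0)
        = (some |min T ((n : Int) - 1) - T|, min T ((n : Int) - 1)) := by
  intro n hn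
  induction n, hn using Nat.le_induction with
  | base =>
    have h1 : ((1 : Nat) : Int) = 0 + 1 := by norm_num
    rw [h1, PySem.List.pyRange_one_singleton]
    simp [pvStep, min_eq_right hT]
  | succ n hn ih =>
    have hcast : (((n + 1 : Nat)) : Int) = (n : Int) + 1 := by push_cast; ring
    rw [hcast, PySem.List.pyRange_one_succ_right (by positivity), List.foldl_append, ih]
    have hn1 : (1 : Int) ≤ (n : Int) := by exact_mod_cast hn
    by_cases hc : T ≤ (n : Int) - 1
    · rw [min_eq_left hc, min_eq_left (by omega)]
      simp only [List.foldl_cons, List.foldl_nil, pvStep, sub_self, abs_zero]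
      rw [if_neg (not_lt.2 (abs_nonneg _))]
    · rw [not_le] at hc
      rw [min_eq_right (by omega), min_eq_right (by omega)]
      simp only [List.foldl_cons, List.foldl_nil, pvStep]
      rw [if_pos (by rw [abs_of_nonpos (by omega), abs_of_nonpos (by omega)]; omega)]
      norm_num

lemma pvScanA_spec (s : List Char) (hpar : ∀ c ∈ s, c = '(' ∨ c = ')') (hne : s ≠ []) :
    (pvScanA s).2 = min ((s.count ')' : Int)) ((s.length : Int) - 1) := by
  unfold pvScanA
  have hcongr : (PySem.List.pyRange 0 (s.length : Int) 1).foldl (fun st i =>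
      let O : Int := (PySem.List.slice s none (some i)).count '('
      let C : Int := (PySem.List.slice s (some i) none).count ')'
      let diff : Int := |O - C|
      match st.1 with
      | none => (some diff, i)
      | some m => if diff < m then (some diff, i) else st) (none, 0)
    = (PySem.List.pyRange 0 (s.length : Int) 1).foldl (pvStep ((s.count ')' : Int))) (none, 0) := by
    refine PySem.List.foldl_congr_mem _ _ _ _ ?_
    intro st i hi
    rw [PySem.List.mem_pyRange_one] at hi
    have hOC : ((PySem.List.slice s none (some i)).count '(' : Int)
        - ((PySem.List.slice s (some i) none).count ')' : Int)
        = i - (s.count ')' : Int) := by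
      rw [PySem.List.slice_to _ hi.1, PySem.List.slice_from _ hi.1]
      have htd : s.count ')' = (s.take i.toNat).count ')' + (s.drop i.toNat).count ')' := by
        conv_lhs => rw [← List.take_append_drop i.toNat s]
        rw [List.count_append]
      have hcnt : (s.take i.toNat).count '(' + (s.take i.toNat).count ')'
          = (s.take i.toNat).length :=
        pvParenCount _ (fun c hc => hpar c (List.mem_of_mem_take hc))
      have hlen : (s.take i.toNat).length = i.toNat := by
        rw [List.length_take]
        omega
      omega
    simp only []
    rw [hOC]
    rfl
  rw [hcongr, pvArgmin _ (by positivity) s.length (by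
    have := List.length_pos_iff.mpr hne
    omega)]

lemma pvMapAB (l : List (Int × Int × String)) (cur idx : Int) :
    pvMapA l cur idx = pvMapB l cur idx := by
  induction l generalizing cur with
  | nil => rfl
  | cons o rest ih => simp only [pvMapA, pvMapB]; split <;> simp [ih]

-- ===== VERDICT (by name: the statement is the Claim_ definition above) =====
theorem calculate_fair_price_spec : Claim_equal_calculate_fair_price := by
  intro orders _
  unfold Spec_calculate_fair_price calculate_fair_price calculate_fair_price_alt
  by_cases h0 : orders = []
  · simp [h0]
  · simp only [h0, if_false]
    set sorted := PySem.List.sorted orders (fun x => x.1) false with hs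
    rw [pvSumB_spec]
    by_cases hE : pvBuildS sorted = []
    · simp [hE]
    · have hlen : (pvBuildS sorted).length ≠ 0 := by simpa using hE
      have : ((pvBuildS sorted).length : Int) ≠ 0 := by exact_mod_cast hlen
      simp only [hE, if_false]
      rw [if_neg this]
      rw [pvScanA_spec _ (pvBuildS_paren sorted) hE, pvMapAB]
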